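-- pv_equiv track=rewrite | github.com/urlagushka/kochou | python/utils.py | c_name_to_cpp
-- ===== SOURCE A (Python) =====
-- def c_name_to_cpp(name: str) -> str:
--     if name == "sType":
--         return "type"
--     if name.startswith("p") and len(name) > 1 and name[1].isupper():
--         name = name[1:]
--     elif name.startswith("pp") and len(name) > 2 and name[2].isupper():
--         name = name[2:]
--
--     result = []
--     for i, c in enumerate(name):
--         if c.isupper() and i > 0 and not name[i-1].isupper():
--             result.append('_')
--         result.append(c.lower())
--     return ''.join(result)
-- ===== SOURCE B (Python) =====
-- import re
--
--
-- def c_name_to_cpp(name: str) -> str: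
--     if name == "sType":
--         return "type"
--     if name.startswith("p") and len(name) > 1 and name[1].isupper():
--         name = name[1:]
--     elif name.startswith("pp") and len(name) > 2 and name[2].isupper():
--         name = name[2:]
--     return re.sub(r'(?<=[^A-Z])([A-Z])', r'_\1', name).lower()
-- ===== Notes on version B (the rewrite author's own statement) =====
-- stated objective: idiomatic
-- what changed: Replaces A's index-based per-character loop (with name[i-1] lookups and a result list joined at the end) by a single re.sub with a lookbehind that inserts an underscore before each uppercase letter preceded by a non-uppercase character, followed by str.lower on the whole string.
import Mathlib
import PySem

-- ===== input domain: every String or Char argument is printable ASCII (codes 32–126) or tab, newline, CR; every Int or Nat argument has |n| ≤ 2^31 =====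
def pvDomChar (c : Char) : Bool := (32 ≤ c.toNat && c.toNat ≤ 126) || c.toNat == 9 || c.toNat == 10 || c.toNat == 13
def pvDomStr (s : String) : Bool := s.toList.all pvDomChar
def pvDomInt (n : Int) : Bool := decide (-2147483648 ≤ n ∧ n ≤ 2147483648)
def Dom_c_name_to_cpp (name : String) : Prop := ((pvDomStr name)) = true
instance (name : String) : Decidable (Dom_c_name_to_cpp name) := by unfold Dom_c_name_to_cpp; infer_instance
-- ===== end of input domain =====

-- B replaces A's indexed per-character loop by a regex-style substitution (insert '_' before
-- each [A-Z] preceded by a non-[A-Z] character) followed by lowercasing; objective: idiomatic.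

-- ===== PORT A =====
-- the loop body: '_' inserted before an uppercase char at i > 0 whose predecessor is not uppercase
def pvStepA (cs : List Char) (acc : List Char) (p : Int × Char) : List Char :=
  let acc :=
    if PySem.Chars.isupper p.2 && decide (p.1 > 0) &&
        !(((PySem.List.pyGet? cs (p.1 - 1)).map PySem.Chars.isupper).getD false)
    then acc ++ ['_'] else acc
  acc ++ [PySem.Chars.lowerChar p.2]

-- prefix stripping shared by A and Source B verbatim (the two if/elif branches)
def pvStrip (cs : List Char) : List Char :=
  if PySem.Chars.startswith cs "p".toList && decide (cs.length > 1) &&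
      (((PySem.List.pyGet? cs 1).map PySem.Chars.isupper).getD false) then
    PySem.Chars.slice cs (some 1) none
  else if PySem.Chars.startswith cs "pp".toList && decide (cs.length > 2) &&
      (((PySem.List.pyGet? cs 2).map PySem.Chars.isupper).getD false) then
    PySem.Chars.slice cs (some 2) none
  else cs

def c_name_to_cpp (name : String) : String :=
  if name = "sType" then "type" else
  let cs := pvStrip name.toList
  String.ofList ((PySem.List.enumerate cs).foldl (pvStepA cs) [])

-- ===== PORT B =====
-- the regex class [A-Z]
def pvUpB (c : Char) : Bool := decide ('A' ≤ c) && decide (c ≤ 'Z')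

-- re.sub(r'(?<=[^A-Z])([A-Z])', r'_\1', ·): hand port, exact — the lookbehind needs a
-- preceding char outside [A-Z]; carried as the previous character during one left-to-right pass
def pvSubGo (prev : Char) : List Char → List Char
  | [] => []
  | c :: t => (if pvUpB c && !pvUpB prev then ['_', c] else [c]) ++ pvSubGo c t

def pvSub : List Char → List Char
  | [] => []
  | c :: t => c :: pvSubGo c t

def c_name_to_cpp_alt (name : String) : String :=
  if name = "sType" then "type" else
  String.ofList (PySem.Chars.lower (pvSub (pvStrip name.toList)))

-- ===== PRECONDITION & SPEC =====
def Spec_c_name_to_cpp (name : String) (out : String) : Prop := out = c_name_to_cpp_alt name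
instance (name : String) (out : String) : Decidable (Spec_c_name_to_cpp name out) := by unfold Spec_c_name_to_cpp; infer_instance

-- ===== CLAIM (what is proved, stated in full; the proofs are below) =====
def Claim_equal_c_name_to_cpp : Prop := ∀ (name : String), Dom_c_name_to_cpp name → Spec_c_name_to_cpp name (c_name_to_cpp name)

-- ===== LEMMAS AND PROOFS =====

-- common specification: output for the rest of the string given the previous char (none at position 0)
def pvG (prev : Option Char) : List Char → List Char
  | [] => []
  | c :: t =>
      (if PySem.Chars.isupper c && (match prev with | some q => !PySem.Chars.isupper q | none => false)
       then ['_'] else []) ++ [PySem.Chars.lowerChar c] ++ pvG (some c) t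

theorem pvUpB_eq (c : Char) : pvUpB c = PySem.Chars.isupper c := rfl

theorem pvLowerChar_us : PySem.Chars.lowerChar '_' = '_' := rfl

theorem pvLower_subGo (p : Char) (t : List Char) :
    PySem.Chars.lower (pvSubGo p t) = pvG (some p) t := by
  induction t generalizing p with
  | nil => rfl
  | cons c t ih =>
    have ih' : ∀ q, List.map PySem.Chars.lowerChar (pvSubGo q t) = pvG (some q) t := by
      simpa [PySem.Chars.lower] using ih
    by_cases h : (PySem.Chars.isupper c && !PySem.Chars.isupper p) = true <;>
      simp [pvSubGo, pvG, pvUpB_eq, h, PySem.Chars.lower, pvLowerChar_us, ih']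

theorem pvLower_sub (cs : List Char) :
    PySem.Chars.lower (pvSub cs) = pvG none cs := by
  cases cs with
  | nil => rfl
  | cons c t =>
    simp only [pvSub, pvG, PySem.Chars.lower, List.map_cons, Bool.and_eq_true]
    rw [← PySem.Chars.lower, pvLower_subGo]
    simp

theorem pvFoldA (t : List Char) : ∀ (pre acc : List Char),
    (PySem.List.enumerate t (pre.length : Int)).foldl (pvStepA (pre ++ t)) acc
      = acc ++ pvG pre.getLast? t := by
  induction t with
  | nil => intro pre acc; simp [PySem.List.enumerate, pvG]
  | cons c t ih =>
    intro pre acc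
    rw [PySem.List.enumerate_cons]
    have hrest : (pre.length : Int) + 1 = (((pre ++ [c]).length : Nat) : Int) := by
      simp
    have hlist : pre ++ c :: t = (pre ++ [c]) ++ t := by simp
    simp only [List.foldl_cons]
    rw [hlist, hrest, ih (pre ++ [c])]
    have hlast : (pre ++ [c]).getLast? = some c := by simp
    rw [hlast, ← hlist]
    -- now compare the single step with pvG's head output
    cases pre with
    | nil =>
      simp [pvStepA, pvG, PySem.List.pyGet?]
    | cons a b =>
      have hget : PySem.List.pyGet? ((a :: b) ++ c :: t) (((a :: b).length : Int) - 1)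
          = some ((a :: b).getLast (by simp)) := by
        have h1 : (((a :: b).length : Int)) - 1 = ((b.length : Nat) : Int) := by
          push_cast [List.length_cons]; omega
        rw [h1, PySem.List.pyGet?_natCast]
        rw [List.getElem?_append_left (by simp)]
        rw [List.getElem?_eq_getElem (by simp)]
        simp [List.getLast_eq_getElem]
        rfl
      simp only [pvStepA, pvG, hget]
      have hl : (a :: b).getLast? = some ((a :: b).getLast (by simp)) := by
        simp [List.getLast?_eq_some_getLast]
      rw [hl]
      by_cases hu : PySem.Chars.isupper c = true <;>
        by_cases hp : PySem.Chars.isupper ((a :: b).getLast (by simp)) = true <;>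
          simp [hu, hp]

-- ===== VERDICT (by name: the statement is the Claim_ definition above) =====
theorem c_name_to_cpp_spec : Claim_equal_c_name_to_cpp := by
  intro name _
  unfold Spec_c_name_to_cpp c_name_to_cpp c_name_to_cpp_alt
  by_cases h : name = "sType"
  · simp [h]
  · simp only [h, if_false]
    rw [pvLower_sub]
    have := pvFoldA (pvStrip name.toList) [] []
    simp only [List.nil_append, List.getLast?_nil] at this
    exact congrArg String.ofList this
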